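-- pv_equiv track=rewrite | github.com/lsherman98/LeetCode | 0929-unique-email-addresses/0929-unique-email-addresses.py | clean_email
-- ===== SOURCE A (Python) =====
-- def clean_email(email):
--     new_email = ''
--     for c in email:
--         if c == '.':
--             continue
--         if c == '+':
--             break
--         new_email += c
--     return new_email
-- ===== SOURCE B (Python) =====
-- def clean_email(email):
--     return email.split('+')[0].replace('.', '')
-- ===== Notes on version B (the rewrite author's own statement) =====
-- stated objective: idiomatic
-- what changed: Replaced the single character loop with continue/break and string accumulation by two library passes: split('+') selecting the first segment, then replace('.', '') on that prefix; the C-level string routines give a large constant-factor speedup.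
import Mathlib
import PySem

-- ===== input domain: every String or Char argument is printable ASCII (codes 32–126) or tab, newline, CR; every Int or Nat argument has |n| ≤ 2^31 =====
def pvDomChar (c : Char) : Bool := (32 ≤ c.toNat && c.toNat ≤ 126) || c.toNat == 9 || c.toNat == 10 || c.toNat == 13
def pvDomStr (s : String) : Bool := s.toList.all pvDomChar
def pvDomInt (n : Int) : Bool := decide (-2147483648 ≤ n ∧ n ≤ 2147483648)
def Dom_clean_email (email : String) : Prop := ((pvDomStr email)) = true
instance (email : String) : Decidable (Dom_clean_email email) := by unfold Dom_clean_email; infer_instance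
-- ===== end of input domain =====

-- B replaces A's single interleaved char loop (continue/break, string accumulation)
-- by two library passes: split('+') and take the first piece, then replace('.', '').


-- ===== PORT A =====
-- the for-loop: acc is new_email; '.' → continue, '+' → break, else append
def cleanEmailLoop (acc : List Char) : List Char → List Char
  | [] => acc
  | c :: rest =>
    if c = '.' then cleanEmailLoop acc rest
    else if c = '+' then acc
    else cleanEmailLoop (acc ++ [c]) rest

def clean_email (email : String) : String :=
  String.ofList (cleanEmailLoop [] email.toList)

-- ===== PORT B =====
-- email.split('+')[0].replace('.', ''); split never yields an empty list,
-- so index [0] always exists (headD's default is never used)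
def clean_email_alt (email : String) : String :=
  PySem.Str.replace (String.ofList ((PySem.Chars.splitOn email.toList ['+']).headD [])) "." ""

-- ===== PRECONDITION & SPEC =====
def Spec_clean_email (email : String) (out : String) : Prop := out = clean_email_alt email
instance (email : String) (out : String) : Decidable (Spec_clean_email email out) := by unfold Spec_clean_email; infer_instance

-- ===== CLAIM (what is proved, stated in full; the proofs are below) =====
def Claim_equal_clean_email : Prop := ∀ (email : String), Dom_clean_email email → Spec_clean_email email (clean_email email)

-- ===== LEMMAS AND PROOFS =====

-- A's loop appends, after acc, the dots-filtered prefix up to the first '+'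
theorem cleanEmailLoop_eq (l : List Char) : ∀ acc,
    cleanEmailLoop acc l = acc ++ (l.takeWhile (· ≠ '+')).filter (· ≠ '.') := by
  induction l with
  | nil => intro acc; simp [cleanEmailLoop]
  | cons c rest ih =>
    intro acc
    by_cases hdot : c = '.'
    · subst hdot
      simp [cleanEmailLoop, ih]
    · by_cases hplus : c = '+'
      · subst hplus
        simp [cleanEmailLoop, hdot]
      · simp [cleanEmailLoop, hdot, hplus, ih]

-- the first piece produced by splitOn.go is cur.reverse ++ the prefix of l before '+'
theorem splitOnGo_head (fuel : Nat) : ∀ (l cur : List Char) (acc : List (List Char)), l.length ≤ fuel →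
    ∃ rest, PySem.Chars.splitOn.go ['+'] fuel l cur acc
      = acc.reverse ++ (cur.reverse ++ l.takeWhile (· ≠ '+')) :: rest := by
  induction fuel with
  | zero =>
    intro l cur acc hl
    have : l = [] := List.length_eq_zero_iff.mp (Nat.le_zero.mp hl)
    subst this
    exact ⟨[], by simp [PySem.Chars.splitOn.go]⟩
  | succ fuel ih =>
    intro l cur acc hl
    cases l with
    | nil => exact ⟨[], by simp [PySem.Chars.splitOn.go]⟩
    | cons c rest =>
      have hlen : rest.length ≤ fuel := by simpa using hl
      by_cases hplus : c = '+'
      · subst hplus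
        simp only [PySem.Chars.splitOn.go]
        rw [show (['+'] : List Char).isPrefixOf ('+' :: rest) = true by simp [List.isPrefixOf]]
        simp only [List.length_cons, List.length_nil, List.drop_succ_cons, List.drop_zero, if_true]
        obtain ⟨r', hr'⟩ := ih rest [] (cur.reverse :: acc) hlen
        rw [hr']
        exact ⟨(rest.takeWhile (· ≠ '+')) :: r', by simp [List.takeWhile_cons]⟩
      · obtain ⟨r, hr⟩ := ih rest (c :: cur) acc hlen
        refine ⟨r, ?_⟩
        simp only [PySem.Chars.splitOn.go]
        rw [show (['+'] : List Char).isPrefixOf (c :: rest) = false by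
          simp [List.isPrefixOf]; exact fun h => hplus h.symm]
        simp only [Bool.false_eq_true, if_false]
        rw [hr]
        simp [List.takeWhile_cons, hplus]

-- replacing a single character by the empty string filters it out
theorem replaceGo_filter (fuel : Nat) : ∀ (l acc : List Char), l.length ≤ fuel →
    PySem.Chars.replace.go ['.'] [] fuel l acc = acc.reverse ++ l.filter (· ≠ '.') := by
  induction fuel with
  | zero =>
    intro l acc hl
    have : l = [] := List.length_eq_zero_iff.mp (Nat.le_zero.mp hl)
    subst this
    simp [PySem.Chars.replace.go]
  | succ fuel ih =>
    intro l acc hl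
    cases l with
    | nil => simp [PySem.Chars.replace.go]
    | cons c rest =>
      have hlen : rest.length ≤ fuel := by simpa using hl
      by_cases hdot : c = '.'
      · subst hdot
        simp only [PySem.Chars.replace.go]
        rw [show (['.'] : List Char).isPrefixOf ('.' :: rest) = true by simp [List.isPrefixOf]]
        simp only [List.length_cons, List.length_nil, List.drop_succ_cons, List.drop_zero,
          List.reverse_nil, List.nil_append, if_true]
        rw [ih rest acc hlen]
        simp
      · simp only [PySem.Chars.replace.go]
        rw [show (['.'] : List Char).isPrefixOf (c :: rest) = false by simp [List.isPrefixOf]; exact fun h => hdot h.symm]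
        simp only [Bool.false_eq_true, if_false]
        rw [ih rest (c :: acc) hlen]
        simp [List.filter_cons, hdot]

theorem replace_dot (l : List Char) :
    PySem.Chars.replace l ['.'] [] = l.filter (· ≠ '.') := by
  simp only [PySem.Chars.replace, List.isEmpty_cons, Bool.false_eq_true, if_false]
  exact replaceGo_filter l.length l [] le_rfl

-- ===== VERDICT (by name: the statement is the Claim_ definition above) =====
theorem clean_email_spec : Claim_equal_clean_email := by
  intro email _
  unfold Spec_clean_email clean_email clean_email_alt
  obtain ⟨rest, hsplit⟩ :=
    splitOnGo_head (email.toList.length + 1) email.toList [] [] (by omega)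
  unfold PySem.Chars.splitOn
  rw [hsplit]
  simp only [List.reverse_nil, List.nil_append, List.headD_cons]
  rw [cleanEmailLoop_eq email.toList []]
  simp [PySem.Str.replace, replace_dot]
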